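-- pv_equiv track=rewrite | github.com/dadadanca/Zaciname | Rekurze.py | jsouStejne
-- ===== SOURCE A (Python) =====
-- def jsouStejne (x,y):
--     if len(x)== len(y):
--         i = 0
--         while i < len(x):
--             if x[i] != y[i]:
--                 return False
--             i = i+1
--         return True
--     else:
--         return False
-- ===== SOURCE B (Python) =====
-- def jsouStejne(x, y):
--     if len(x) != len(y):
--         return False
--     if len(x) == 0:
--         return True
--     if len(x) == 1:
--         return x[0] == y[0]
--     m = len(x) // 2
--     return jsouStejne(x[:m], y[:m]) and jsouStejne(x[m:], y[m:])
-- ===== Notes on version B (the rewrite author's own statement) =====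
-- stated objective: alternative
-- what changed: Replaced the indexed while-loop walk with a divide-and-conquer recursion: length check up front, base cases for length 0 and 1, otherwise split both sequences at the midpoint and recurse on the two halves.
import Mathlib
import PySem

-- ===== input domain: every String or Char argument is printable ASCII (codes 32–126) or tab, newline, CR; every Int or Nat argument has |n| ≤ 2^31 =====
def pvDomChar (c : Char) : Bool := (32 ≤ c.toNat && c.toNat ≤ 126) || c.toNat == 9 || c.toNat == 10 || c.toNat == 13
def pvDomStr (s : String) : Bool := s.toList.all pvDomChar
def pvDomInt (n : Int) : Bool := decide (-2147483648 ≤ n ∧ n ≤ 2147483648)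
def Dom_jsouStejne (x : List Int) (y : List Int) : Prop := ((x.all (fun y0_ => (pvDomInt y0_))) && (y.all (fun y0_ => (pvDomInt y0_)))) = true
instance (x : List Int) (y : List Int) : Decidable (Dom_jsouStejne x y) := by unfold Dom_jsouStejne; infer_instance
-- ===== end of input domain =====

-- B replaces A's indexed while-loop with a divide-and-conquer recursion on the midpoint split; same return value, no speed claim.

-- ===== PORT A =====
-- the while-loop: i walks from 0, returns False at the first mismatch, True past the end
def jsouStejneLoop (x : List Int) (y : List Int) (i : Nat) : Bool :=
  if i < x.length then
    if x.getD i 0 ≠ y.getD i 0 then false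
    else jsouStejneLoop x y (i + 1)
  else true
termination_by x.length - i

def jsouStejne (x : List Int) (y : List Int) : Bool :=
  if x.length = y.length then jsouStejneLoop x y 0 else false

-- ===== PORT B =====
def jsouStejne_alt (x : List Int) (y : List Int) : Bool :=
  if x.length ≠ y.length then false
  else if x.length = 0 then true
  else if x.length = 1 then x.headI == y.headI
  else
    jsouStejne_alt (x.take (x.length / 2)) (y.take (x.length / 2)) &&
    jsouStejne_alt (x.drop (x.length / 2)) (y.drop (x.length / 2))
termination_by x.length
decreasing_by
  · simp only [List.length_take]; omega
  · simp only [List.length_drop]; omega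

-- ===== PRECONDITION & SPEC =====
def Spec_jsouStejne (x : List Int) (y : List Int) (out : Bool) : Prop := out = jsouStejne_alt x y
instance (x : List Int) (y : List Int) (out : Bool) : Decidable (Spec_jsouStejne x y out) := by unfold Spec_jsouStejne; infer_instance

-- ===== CLAIM (what is proved, stated in full; the proofs are below) =====
def Claim_equal_jsouStejne : Prop := ∀ (x : List Int) (y : List Int), Dom_jsouStejne x y → Spec_jsouStejne x y (jsouStejne x y)

-- ===== LEMMAS AND PROOFS =====
-- A's loop decides equality of the suffixes from i, given equal lengths
theorem jsouStejneLoop_eq (x y : List Int) (hlen : x.length = y.length) :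
    ∀ n i, x.length - i ≤ n → jsouStejneLoop x y i = decide (x.drop i = y.drop i) := by
  intro n
  induction n with
  | zero =>
    intro i hle
    have h : ¬ i < x.length := by omega
    unfold jsouStejneLoop
    rw [if_neg h]
    have hx : x.drop i = [] := List.drop_eq_nil_of_le (by omega)
    have hy : y.drop i = [] := List.drop_eq_nil_of_le (by omega)
    simp [hx, hy]
  | succ n ih =>
    intro i hle
    unfold jsouStejneLoop
    by_cases h : i < x.length
    · have hy : i < y.length := hlen ▸ h
      have hx : x.drop i = x[i] :: x.drop (i + 1) := List.drop_eq_getElem_cons h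
      have hyd : y.drop i = y[i] :: y.drop (i + 1) := List.drop_eq_getElem_cons hy
      rw [if_pos h]
      have hgx : x.getD i 0 = x[i] := by simp [List.getD, List.getElem?_eq_getElem h]
      have hgy : y.getD i 0 = y[i] := by simp [List.getD, List.getElem?_eq_getElem hy]
      by_cases heq : x[i] = y[i]
      · rw [if_neg (by rw [hgx, hgy]; simp [heq])]
        rw [ih (i + 1) (by omega), hx, hyd, decide_eq_decide]
        simp only [List.cons.injEq, heq, true_and]
      · rw [if_pos (by rw [hgx, hgy]; simp [heq])]
        rw [hx, hyd]
        symm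
        rw [decide_eq_false_iff_not]
        simp only [List.cons.injEq, not_and]
        intro hcontr
        exact absurd hcontr heq
    · rw [if_neg h]
      have hx : x.drop i = [] := List.drop_eq_nil_of_le (by omega)
      have hy : y.drop i = [] := List.drop_eq_nil_of_le (by omega)
      simp [hx, hy]

theorem alt_eq : ∀ (n : Nat) (x y : List Int), x.length ≤ n → jsouStejne_alt x y = decide (x = y) := by
  intro n
  induction n with
  | zero =>
    intro x y hle
    have hx : x = [] := List.eq_nil_of_length_eq_zero (by omega)
    unfold jsouStejne_alt
    subst hx
    cases y <;> simp
  | succ n ih =>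
    intro x y hle
    unfold jsouStejne_alt
    by_cases hlen : x.length = y.length
    · by_cases h0 : x.length = 0
      · have hx : x = [] := List.eq_nil_of_length_eq_zero h0
        have hy : y = [] := List.eq_nil_of_length_eq_zero (by omega)
        simp [hx, hy]
      · by_cases h1 : x.length = 1
        · rw [if_neg (by simp [hlen]), if_neg h0, if_pos h1]
          match x, y, h1, hlen with
          | [a], [b], _, _ =>
            simp only [List.headI, List.cons.injEq, and_true]
            cases h : (a == b) with
            | true => simp [eq_of_beq h]
            | false => simp [beq_eq_false_iff_ne.mp h]
        · rw [if_neg (by simp [hlen]), if_neg h0, if_neg h1]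
          have hm1 : 1 ≤ x.length / 2 := by omega
          have hm2 : x.length / 2 < x.length := by omega
          rw [ih (x.take (x.length / 2)) (y.take (x.length / 2)) (by simp; omega),
              ih (x.drop (x.length / 2)) (y.drop (x.length / 2)) (by simp; omega)]
          have hsplit : x = y ↔ (x.take (x.length / 2) = y.take (x.length / 2) ∧
              x.drop (x.length / 2) = y.drop (x.length / 2)) := by
            constructor
            · intro h; subst h; exact ⟨rfl, rfl⟩
            · intro ⟨ht, hd⟩
              calc x = x.take (x.length / 2) ++ x.drop (x.length / 2) :=
                      (List.take_append_drop _ x).symm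
                _ = y.take (x.length / 2) ++ y.drop (x.length / 2) := by rw [ht, hd]
                _ = y := List.take_append_drop _ y
          by_cases hxy : x = y
          · simp [hxy]
          · rw [decide_eq_false hxy]
            rw [hsplit] at hxy
            rcases Decidable.not_and_iff_or_not.mp hxy with h | h
            · simp [decide_eq_false h]
            · simp [decide_eq_false h]
    · rw [if_pos (by simp [hlen])]
      have hne : x ≠ y := fun h => hlen (by rw [h])
      simp [hne]

-- ===== VERDICT (by name: the statement is the Claim_ definition above) =====
theorem jsouStejne_spec : Claim_equal_jsouStejne := by
  intro x y _
  unfold Spec_jsouStejne jsouStejne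
  rw [alt_eq x.length x y le_rfl]
  by_cases hlen : x.length = y.length
  · rw [if_pos hlen, jsouStejneLoop_eq x y hlen x.length 0 (by omega)]; simp
  · rw [if_neg hlen]
    have : x ≠ y := fun h => hlen (by rw [h])
    simp [this]
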